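-- pv_equiv track=rewrite | github.com/Kugumi/Addr_parse | fill_other.py | fill_building_number
-- ===== SOURCE A (Python) =====
-- def fill_building_number(row):
--     s = list()
--     num = ""
--     for r in row.split():
--         if r[0].isnumeric() and not num and (len(r) <= 3):
--             num = r
--         else:
--             s.append(r)
--     return num, " ".join(s)
-- ===== SOURCE B (Python) =====
-- def fill_building_number(row):
--     # Staged, value-based: find the first qualifying token's VALUE, then delete
--     # by value. Correct because qualifying depends only on the string value, so
--     # the first occurrence of that value is exactly the first qualifying token.
--     words = row.split()
--     num = next((w for w in words if w[0].isnumeric() and len(w) <= 3), "")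
--     if num:
--         words.remove(num)
--     return num, " ".join(words)
-- ===== Notes on version B (the rewrite author's own statement) =====
-- stated objective: alternative
-- what changed: A is one manual pass with a num flag and a growing remainder accumulator; B is staged and value-based: next() extracts the first qualifying token's value, then list.remove deletes that value's first occurrence, which is sound because qualification depends only on the token's value (a fact the Lean proof establishes).
import Mathlib
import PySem

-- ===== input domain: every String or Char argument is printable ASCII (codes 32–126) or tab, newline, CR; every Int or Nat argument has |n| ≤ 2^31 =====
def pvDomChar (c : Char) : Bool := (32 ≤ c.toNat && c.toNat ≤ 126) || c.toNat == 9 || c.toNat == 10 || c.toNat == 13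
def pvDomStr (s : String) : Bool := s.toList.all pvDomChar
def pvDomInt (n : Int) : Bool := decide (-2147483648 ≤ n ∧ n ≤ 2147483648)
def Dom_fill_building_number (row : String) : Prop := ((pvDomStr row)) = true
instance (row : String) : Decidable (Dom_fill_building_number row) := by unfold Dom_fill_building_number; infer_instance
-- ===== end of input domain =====

-- B replaces A's flag-and-accumulator loop by two staged value-based steps: find the first
-- qualifying token's value, then delete by value (objective: alternative decomposition, same cost).

-- ===== PORT A =====
-- r[0].isnumeric(): on the printable-ASCII input domain this equals isdigit (exact there).
def pvFirstIsNum (r : String) : Bool :=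
  match PySem.Str.pyGet? r 0 with
  | some c => PySem.Chars.isdigit c
  | none => false

-- A's loop: state (s, num), 'if r[0].isnumeric() and not num and len(r) <= 3'.
def pvLoopA : List String → List String → String → String × String
  | [], s, num => (num, PySem.Str.join " " s)
  | r :: rest, s, num =>
    if pvFirstIsNum r && decide (num = "") && decide (PySem.Str.len r ≤ 3) then
      pvLoopA rest s r
    else
      pvLoopA rest (s ++ [r]) num

def fill_building_number (row : String) : String × String :=
  pvLoopA (PySem.Str.split₀ row) [] ""

-- ===== PORT B =====
-- 'w[0].isnumeric() and len(w) <= 3'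
def pvQual (w : String) : Bool :=
  pvFirstIsNum w && decide (PySem.Str.len w ≤ 3)

-- B: next(...) = List.find?, words.remove(num) = List.erase (first occurrence by value).
def fill_building_number_alt (row : String) : String × String :=
  let words := PySem.Str.split₀ row
  match words.find? pvQual with
  | none => ("", PySem.Str.join " " words)
  | some num => (num, PySem.Str.join " " (words.erase num))

-- ===== PRECONDITION & SPEC =====
def Spec_fill_building_number (row : String) (out : String × String) : Prop := out = fill_building_number_alt row
instance (row : String) (out : String × String) : Decidable (Spec_fill_building_number row out) := by unfold Spec_fill_building_number; infer_instance

-- ===== CLAIM (what is proved, stated in full; the proofs are below) =====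
def Claim_equal_fill_building_number : Prop := ∀ (row : String), Dom_fill_building_number row → Spec_fill_building_number row (fill_building_number row)

-- ===== LEMMAS AND PROOFS =====

lemma pvFirstIsNum_ne_empty {r : String} (h : pvFirstIsNum r = true) : r ≠ "" := by
  intro he; subst he; simp [pvFirstIsNum, PySem.List.pyGet?] at h

lemma pvQual_ne_empty {r : String} (h : pvQual r = true) : r ≠ "" := by
  have := (Bool.and_eq_true _ _).mp h
  exact pvFirstIsNum_ne_empty this.1

-- once num is nonempty, A's loop only appends
lemma pvLoopA_nonempty (ws : List String) (s : List String) (num : String) (h : num ≠ "") :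
    pvLoopA ws s num = (num, PySem.Str.join " " (s ++ ws)) := by
  induction ws generalizing s with
  | nil => simp [pvLoopA]
  | cons r rest ih =>
    rw [pvLoopA, if_neg (by simp [decide_eq_false h]), ih]
    simp

-- A's loop in the empty-num state = B's find-then-erase-by-value (accumulator prepended).
-- The value step: since pvQual is a pure property of the string, the found token n differs
-- from every earlier (non-qualifying) word, so erasing n's first occurrence removes exactly it.
lemma pvLoopA_empty (ws : List String) (s : List String) :
    pvLoopA ws s "" =
      match ws.find? pvQual with
      | none => ("", PySem.Str.join " " (s ++ ws))
      | some n => (n, PySem.Str.join " " (s ++ ws.erase n)) := by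
  induction ws generalizing s with
  | nil => simp [pvLoopA]
  | cons r rest ih =>
    have hcond : (pvFirstIsNum r && decide ("" = "") && decide (PySem.Str.len r ≤ 3)) = pvQual r := by
      simp [pvQual]
    by_cases hq : pvQual r = true
    · rw [pvLoopA, hcond, if_pos hq, pvLoopA_nonempty _ _ _ (pvQual_ne_empty hq)]
      simp [List.find?_cons_of_pos hq, List.erase_cons_head]
    · rw [pvLoopA, hcond, if_neg (by simp [hq]), ih]
      rw [List.find?_cons_of_neg hq]
      cases hf : rest.find? pvQual with
      | none => simp
      | some n =>
        have hqn : pvQual n = true := List.find?_some hf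
        have hrn : r ≠ n := by intro he; rw [he] at hq; exact hq hqn
        have : (r :: rest).erase n = r :: rest.erase n := by
          rw [List.erase_cons_tail]; simp [hrn]
        simp [this]

-- ===== VERDICT (by name: the statement is the Claim_ definition above) =====
theorem fill_building_number_spec : Claim_equal_fill_building_number := by
  intro row _
  unfold Spec_fill_building_number fill_building_number fill_building_number_alt
  rw [pvLoopA_empty]
  cases h : (PySem.Str.split₀ row).find? pvQual <;> simp [h]
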